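-- pv_equiv track=rewrite | github.com/XGuang4010/secrets-scanner | scripts/report_common.py | derive_owner_repo
-- ===== SOURCE A (Python) =====
-- def derive_owner_repo(repo_path: str) -> tuple:
--     """Derive owner/repo from a local path."""
--     if not repo_path or repo_path == "unknown":
--         return "unknown", "unknown"
--     parts = [p for p in repo_path.replace("\\", "/").split("/") if p]
--     if len(parts) >= 2:
--         return parts[-2], parts[-1]
--     if len(parts) == 1:
--         return "unknown", parts[0]
--     return "unknown", "unknown"
-- ===== SOURCE B (Python) =====
-- def derive_owner_repo(repo_path: str) -> tuple:
--     """Derive owner/repo from a local path."""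
--     if not repo_path:
--         return "unknown", "unknown"
--     owner = repo = None
--     cur = ""
--     for ch in repo_path:
--         if ch == "/" or ch == "\\":
--             if cur:
--                 owner, repo = repo, cur
--                 cur = ""
--         else:
--             cur += ch
--     if cur:
--         owner, repo = repo, cur
--     return (owner if owner is not None else "unknown",
--             repo if repo is not None else "unknown")
-- ===== Notes on version B (the rewrite author's own statement) =====
-- stated objective: alternative
-- what changed: Replaces A's replace-then-split-then-filter-then-index pipeline by a single forward streaming scan over the characters that keeps only a rolling (owner, repo) pair and the current segment, shifting the pair at each separator flush; no intermediate part list is built.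
import Mathlib
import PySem

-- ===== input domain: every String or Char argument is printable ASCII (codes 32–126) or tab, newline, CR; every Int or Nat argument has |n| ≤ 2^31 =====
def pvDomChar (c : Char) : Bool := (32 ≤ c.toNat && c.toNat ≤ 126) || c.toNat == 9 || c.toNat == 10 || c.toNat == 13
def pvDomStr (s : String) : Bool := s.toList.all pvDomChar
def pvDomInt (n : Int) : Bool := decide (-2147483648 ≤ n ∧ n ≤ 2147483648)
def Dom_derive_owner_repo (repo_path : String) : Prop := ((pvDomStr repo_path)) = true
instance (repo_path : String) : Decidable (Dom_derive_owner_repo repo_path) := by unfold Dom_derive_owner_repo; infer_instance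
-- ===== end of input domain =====

-- B replaces A's replace/split/filter/index pipeline by one forward streaming scan keeping only
-- a rolling (owner, repo) pair and the current segment; objective: alternative (same O(n) cost).

-- ===== PORT A =====
def derive_owner_repo (repo_path : String) : String × String :=
  if repo_path = "" ∨ repo_path = "unknown" then ("unknown", "unknown")
  else
    let parts := ((PySem.Str.split? (PySem.Str.replace repo_path "\\" "/") "/").getD []).filter (fun p => p ≠ "")
    if parts.length ≥ 2 then
      ((PySem.List.pyGet? parts (-2)).getD "", (PySem.List.pyGet? parts (-1)).getD "")
    else if parts.length = 1 then
      ("unknown", (PySem.List.pyGet? parts 0).getD "")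
    else ("unknown", "unknown")

-- ===== PORT B =====
-- the for-loop of Source B: state = (owner, repo, cur); cur grows by appending (cur ++ [c]),
-- the final [] case is the trailing `if cur:` flush after the loop
def scanB : List Char → Option (List Char) → Option (List Char) → List Char →
    Option (List Char) × Option (List Char)
  | [], ow, rp, cur => if cur ≠ [] then (rp, some cur) else (ow, rp)
  | c :: rest, ow, rp, cur =>
      if c = '/' ∨ c = '\\' then
        (if cur ≠ [] then scanB rest rp (some cur) [] else scanB rest ow rp cur)
      else scanB rest ow rp (cur ++ [c])

def derive_owner_repo_alt (repo_path : String) : String × String :=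
  if repo_path = "" then ("unknown", "unknown")
  else
    let st := scanB repo_path.toList none none []
    ((st.1.map String.ofList).getD "unknown", (st.2.map String.ofList).getD "unknown")

-- ===== PRECONDITION & SPEC =====
def Spec_derive_owner_repo (repo_path : String) (out : String × String) : Prop := out = derive_owner_repo_alt repo_path
instance (repo_path : String) (out : String × String) : Decidable (Spec_derive_owner_repo repo_path out) := by unfold Spec_derive_owner_repo; infer_instance

-- ===== CLAIM (what is proved, stated in full; the proofs are below) =====
def Claim_equal_derive_owner_repo : Prop := ∀ (repo_path : String), Dom_derive_owner_repo repo_path → Spec_derive_owner_repo repo_path (derive_owner_repo repo_path)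

-- ===== LEMMAS AND PROOFS =====

-- sub: what A's replace("\\","/") does to one character
def subC (c : Char) : Char := if c = '\\' then '/' else c

-- spec split: the '/'-or-'\\' segments of l, cur prepended to the first one
def splitc : List Char → List Char → List (List Char)
  | [], cur => [cur]
  | c :: rest, cur =>
      if c = '/' ∨ c = '\\' then cur :: splitc rest [] else splitc rest (cur ++ [c])

set_option maxRecDepth 4096 in
theorem replace_go_eq (fuel : Nat) : ∀ (l acc : List Char), l.length ≤ fuel →
    PySem.Chars.replace.go ['\\'] ['/'] fuel l acc = acc.reverse ++ l.map subC := by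
  induction fuel with
  | zero =>
    intro l acc h
    have hl : l = [] := by cases l with | nil => rfl | cons a b => simp at h
    subst hl; simp [PySem.Chars.replace.go]
  | succ n ih =>
    intro l acc h
    cases l with
    | nil => simp [PySem.Chars.replace.go]
    | cons c rest =>
      have hr : rest.length ≤ n := by simpa using Nat.le_of_succ_le_succ (by simpa using h)
      by_cases hc : c = '\\'
      · subst hc
        simp only [PySem.Chars.replace.go, List.isPrefixOf,
          beq_self_eq_true, Bool.true_and, if_pos, List.length_cons, List.length_nil,
          List.drop_succ_cons, List.drop_zero]
        rw [ih _ _ hr]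
        simp [subC]
      · simp only [PySem.Chars.replace.go, List.isPrefixOf, Bool.and_true]
        rw [if_neg (by simp only [beq_iff_eq]; exact fun h1 => hc h1.symm)]
        rw [ih _ _ hr]
        simp [subC, hc]

set_option maxRecDepth 4096 in
theorem split_go_eq (fuel : Nat) : ∀ (l cur : List Char) (accL : List (List Char)),
    l.length ≤ fuel →
    PySem.Chars.splitOn.go ['/'] fuel (l.map subC) cur accL =
      accL.reverse ++ splitc l cur.reverse := by
  induction fuel with
  | zero =>
    intro l cur accL h
    have hl : l = [] := by cases l with | nil => rfl | cons a b => simp at h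
    subst hl; simp [PySem.Chars.splitOn.go, splitc]
  | succ n ih =>
    intro l cur accL h
    cases l with
    | nil => simp [PySem.Chars.splitOn.go, splitc]
    | cons c rest =>
      have hr : rest.length ≤ n := by simpa using Nat.le_of_succ_le_succ (by simpa using h)
      by_cases hc : c = '/' ∨ c = '\\'
      · have hsub : subC c = '/' := by rcases hc with h1 | h1 <;> simp [subC, h1]
        simp only [List.map_cons, hsub, PySem.Chars.splitOn.go, List.isPrefixOf,
          beq_self_eq_true, Bool.true_and, if_pos,
          List.length_cons, List.length_nil, List.drop_succ_cons, List.drop_zero]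
        rw [ih _ _ _ hr]
        simp [splitc, hc]
      · have hsub : subC c = c := by
          simp only [subC, ite_eq_right_iff]; intro h1; exact absurd (Or.inr h1) hc
        simp only [List.map_cons, hsub, PySem.Chars.splitOn.go, List.isPrefixOf, Bool.and_true]
        rw [if_neg (by simp only [beq_iff_eq]; intro h1; exact hc (Or.inl h1.symm))]
        rw [ih _ _ _ hr]
        simp [splitc, hc]

-- A's parts, at the List-Char level
theorem parts_eq (l : List Char) :
    ((PySem.Str.split? (PySem.Str.replace (String.ofList l) "\\" "/") "/").getD []).filter (fun p => p ≠ "")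
      = List.map String.ofList ((splitc l []).filter (fun p => p ≠ [])) := by
  have hrep : PySem.Str.replace (String.ofList l) "\\" "/" = String.ofList (l.map subC) := by
    simp only [PySem.Str.replace, PySem.Chars.replace, String.toList_ofList]
    rw [show (("\\" : String).toList) = ['\\'] from rfl, show (("/" : String).toList) = ['/'] from rfl]
    simp only [List.isEmpty_cons, Bool.false_eq_true, if_false]
    rw [replace_go_eq l.length l [] le_rfl]
    simp
  rw [hrep]
  simp only [PySem.Str.split?, PySem.Chars.split?, String.toList_ofList]
  rw [show (("/" : String).toList) = ['/'] from rfl]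
  simp only [List.isEmpty_cons, Bool.false_eq_true, if_false, Option.map_some, Option.getD_some,
    PySem.Chars.splitOn]
  rw [show (l.map subC).length = l.length from by simp]
  rw [split_go_eq (l.length + 1) l [] [] (by omega)]
  simp only [List.reverse_nil, List.nil_append]
  rw [List.filter_map]
  exact congrArg (List.map String.ofList)
    (List.filter_congr (fun p _ => by simp))

-- the shift Source B's flush performs
def shiftP (st : Option (List Char) × Option (List Char)) (seg : List Char) :
    Option (List Char) × Option (List Char) := (st.2, some seg)

theorem scanB_eq : ∀ (l : List Char) (ow rp : Option (List Char)) (cur : List Char),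
    scanB l ow rp cur = ((splitc l cur).filter (fun p => p ≠ [])).foldl shiftP (ow, rp) := by
  intro l
  induction l with
  | nil =>
    intro ow rp cur
    by_cases h : cur = [] <;> simp [scanB, splitc, shiftP, h]
  | cons c rest ih =>
    intro ow rp cur
    by_cases hc : c = '/' ∨ c = '\\'
    · by_cases hcur : cur = []
      · subst hcur; simp [scanB, splitc, hc, ih]
      · simp [scanB, splitc, hc, hcur, ih, shiftP]
    · simp [scanB, splitc, hc, ih]

set_option maxHeartbeats 1000000 in
theorem alt_unknown : derive_owner_repo_alt "unknown" = ("unknown", "unknown") := by decide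

-- agreement for any string, as a function of the common segment list Q
theorem main_eq (l : List Char) :
    (let parts := (List.map String.ofList ((splitc l []).filter (fun p => p ≠ [])));
     if parts.length ≥ 2 then
       ((PySem.List.pyGet? parts (-2)).getD "", (PySem.List.pyGet? parts (-1)).getD "")
     else if parts.length = 1 then
       ("unknown", (PySem.List.pyGet? parts 0).getD "")
     else ("unknown", "unknown"))
    = (let st := (((splitc l []).filter (fun p => p ≠ [])).foldl shiftP (none, none));
       ((st.1.map String.ofList).getD "unknown", (st.2.map String.ofList).getD "unknown")) := by
  generalize (splitc l []).filter (fun p => p ≠ []) = Q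
  rcases hr : Q.reverse with _ | ⟨x, _ | ⟨y, r⟩⟩
  · have : Q = [] := by simpa using congrArg List.reverse hr
    subst this; simp
  · have : Q = [x] := by have := congrArg List.reverse hr; simpa using this
    subst this
    simp [shiftP, PySem.List.pyGet?, PySem.List.pyIdx?]
  · have hQ : Q = r.reverse ++ [y, x] := by
      have := congrArg List.reverse hr; simpa using this
    subst hQ
    have hlen : (List.map String.ofList (r.reverse ++ [y, x])).length = r.length + 2 := by simp
    rw [show (List.map String.ofList (r.reverse ++ [y, x])) =
        (List.map String.ofList r.reverse) ++ [String.ofList y, String.ofList x] from by simp]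
    rw [if_pos (by simp)]
    rw [PySem.List.pyGet?_neg_ofNat _ 2 (by omega) (by simp),
        PySem.List.pyGet?_neg_ofNat _ 1 (by omega) (by simp)]
    have h2 : ((List.map String.ofList r.reverse) ++ [String.ofList y, String.ofList x]).length - 2
        = (List.map String.ofList r.reverse).length := by simp
    have h1 : ((List.map String.ofList r.reverse) ++ [String.ofList y, String.ofList x]).length - 1
        = (List.map String.ofList r.reverse).length + 1 := by simp
    rw [h2, h1]
    rw [List.getElem?_append_right (by omega), List.getElem?_append_right (by omega)]
    simp [List.foldl_append, shiftP]

-- ===== VERDICT (by name: the statement is the Claim_ definition above) =====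
theorem derive_owner_repo_spec : Claim_equal_derive_owner_repo := by
  intro s _
  unfold Spec_derive_owner_repo
  by_cases h0 : s = ""
  · simp [derive_owner_repo, derive_owner_repo_alt, h0]
  · by_cases hu : s = "unknown"
    · subst hu
      have hA : derive_owner_repo "unknown" = ("unknown", "unknown") := by
        rw [derive_owner_repo, if_pos (by simp)]
      rw [hA, alt_unknown]
    · have h : ¬(s = "" ∨ s = "unknown") := by tauto
      rw [derive_owner_repo, derive_owner_repo_alt, if_neg h, if_neg h0]
      conv_lhs => rw [← (String.ofList_toList : String.ofList s.toList = s)]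
      rw [parts_eq s.toList, scanB_eq]
      exact main_eq s.toList
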